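-- pv_equiv track=rewrite | github.com/drizztSun/common_project | PythonLeetcode/Leetcode/1199_MinimumTimeToBuildBlocks.py | doit_heap_huffman
-- ===== SOURCE A (Python) =====
-- def doit_heap_huffman(blocks, split):
--
--     import heapq
--     heapq.heapify(blocks)
--     while len(blocks) > 1:
--         block_1 = heapq.heappop(blocks)
--         block_2 = heapq.heappop(blocks)
--         new_block = max(block_1, block_2) + split
--         heapq.heappush(blocks, new_block)
--     return blocks[0]
-- ===== SOURCE B (Python) =====
-- def doit_heap_huffman(blocks, split):
--     # Return-value equivalent to A; does not mutate `blocks` (A heapifies/pops it in place).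
--     from collections import deque
--     orig = deque(sorted(blocks))
--     merged = deque()
--
--     def pop_min():
--         if not merged or (orig and orig[0] <= merged[0]):
--             return orig.popleft()
--         return merged.popleft()
--
--     while len(orig) + len(merged) > 1:
--         a = pop_min()
--         b = pop_min()
--         merged.append(max(a, b) + split)
--     return orig[0] if orig else merged[0]
-- ===== Notes on version B (the rewrite author's own statement) =====
-- stated objective: faster
-- what changed: Replaces the binary heap (heapify + O(log n) push/pop per merge) by sort-once plus a linear two-queue Huffman merge: the sorted originals and a FIFO of merged results, always taking the two smallest queue fronts.
import Mathlib
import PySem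

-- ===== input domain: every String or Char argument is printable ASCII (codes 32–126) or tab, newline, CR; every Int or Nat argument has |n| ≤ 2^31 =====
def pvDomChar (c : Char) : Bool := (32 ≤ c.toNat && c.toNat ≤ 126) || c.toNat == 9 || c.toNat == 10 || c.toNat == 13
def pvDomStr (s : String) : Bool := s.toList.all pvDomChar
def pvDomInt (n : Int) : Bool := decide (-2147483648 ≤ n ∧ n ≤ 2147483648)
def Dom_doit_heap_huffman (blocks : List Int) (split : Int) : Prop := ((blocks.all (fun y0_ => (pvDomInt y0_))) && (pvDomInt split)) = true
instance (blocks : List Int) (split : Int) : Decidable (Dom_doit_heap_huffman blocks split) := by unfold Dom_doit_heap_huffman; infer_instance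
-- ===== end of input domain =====

-- B replaces A's binary heap by sort-once + two FIFO queues (classic linear Huffman merge);
-- equivalence is about the RETURN value only: A mutates `blocks` in place (heapify/pops), B does not.

-- ===== PORT A =====
-- A's heap is modelled by its multiset of elements: heapq.heappop returns the minimum
-- (popMinA removes the first minimal element), heapq.heappush appends, heapify is the identity
-- on the multiset.  Exact for the return value, which depends only on the heap's multiset.
def popMinA : List Int → Int × List Int
  | [] => (0, [])
  | x :: xs =>
    match popMinA xs with
    | (m, r) => if x ≤ m ∨ xs = [] then (x, xs) else (m, x :: r)

theorem popMinA_length : ∀ (l : List Int), l ≠ [] → (popMinA l).2.length + 1 = l.length := by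
  intro l hl
  induction l with
  | nil => exact absurd rfl hl
  | cons x xs ih =>
    simp only [popMinA]
    cases hxs : popMinA xs with
    | mk m r =>
      by_cases h : x ≤ m ∨ xs = []
      · simp [h]
      · have hne : xs ≠ [] := by intro h0; exact h (Or.inr h0)
        have := ih hne
        rw [hxs] at this
        simp only [if_neg h]
        simp only [List.length_cons] at this ⊢
        omega

-- the while-loop of A: pop the two minima, push max+split, until one element remains
def heapLoop (split : Int) (heap : List Int) : Int :=
  if h : 1 < heap.length then
    let p := popMinA heap
    let q := popMinA p.2
    heapLoop split (q.2 ++ [max p.1 q.1 + split])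
  else heap.headD 0    -- heap[0]; [] (IndexError in Python) is excluded by Pre_
termination_by heap.length
decreasing_by
  have h1 : heap ≠ [] := by intro h0; subst h0; simp at h
  have e1 := popMinA_length heap h1
  have h2 : (popMinA heap).2 ≠ [] := by
    intro h0; rw [h0] at e1; simp at e1; omega
  have e2 := popMinA_length (popMinA heap).2 h2
  simp only [List.length_append, List.length_cons, List.length_nil]
  omega

def doit_heap_huffman (blocks : List Int) (split : Int) : Int :=
  heapLoop split blocks

-- ===== PORT B =====
-- pop_min of Source B: take the smaller front of the two queues (originals first on ties)
def popMinB : List Int → List Int → Int × List Int × List Int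
  | [], [] => (0, [], [])          -- unreachable: the loop guard keeps ≥ 2 elements
  | [], m :: ms => (m, [], ms)
  | o :: os, [] => (o, os, [])
  | o :: os, m :: ms => if o ≤ m then (o, os, m :: ms) else (m, o :: os, ms)

theorem popMinB_length : ∀ (o m : List Int), ¬(o = [] ∧ m = []) →
    (popMinB o m).2.1.length + (popMinB o m).2.2.length + 1 = o.length + m.length := by
  intro o m h
  match o, m with
  | [], [] => exact absurd ⟨rfl, rfl⟩ h
  | [], m :: ms => simp [popMinB]
  | o :: os, [] => simp [popMinB]
  | o :: os, m :: ms =>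
    simp only [popMinB]
    by_cases hc : o ≤ m <;> simp [hc] <;> omega

-- the while-loop of Source B over the two queues
def twoLoop (split : Int) (orig merged : List Int) : Int :=
  if h : 1 < orig.length + merged.length then
    let p := popMinB orig merged
    let q := popMinB p.2.1 p.2.2
    twoLoop split q.2.1 (q.2.2 ++ [max p.1 q.1 + split])
  else
    match orig with
    | o :: _ => o
    | [] => merged.headD 0         -- merged[0]; [] (IndexError in Python) is excluded by Pre_
termination_by orig.length + merged.length
decreasing_by
  have h1 : ¬(orig = [] ∧ merged = []) := by
    rintro ⟨h0a, h0b⟩; subst h0a; subst h0b; simp at h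
  have e1 := popMinB_length orig merged h1
  have h2 : ¬((popMinB orig merged).2.1 = [] ∧ (popMinB orig merged).2.2 = []) := by
    rintro ⟨h0a, h0b⟩
    rw [h0a, h0b] at e1; simp at e1; omega
  have e2 := popMinB_length _ _ h2
  simp only [List.length_append, List.length_cons, List.length_nil]
  omega

def doit_heap_huffman_alt (blocks : List Int) (split : Int) : Int :=
  twoLoop split (PySem.List.sorted blocks (fun x => x) false) []

-- ===== PRECONDITION & SPEC =====
-- Pre_ excludes only the empty list, on which Python A raises IndexError (blocks[0]).
def Pre_doit_heap_huffman (blocks : List Int) (split : Int) : Prop := blocks ≠ []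
instance (blocks : List Int) (split : Int) : Decidable (Pre_doit_heap_huffman blocks split) := by unfold Pre_doit_heap_huffman; infer_instance
def pvWitness_doit_heap_huffman : List Int × Int := ([3, 1, 2], 5)

def Spec_doit_heap_huffman (blocks : List Int) (split : Int) (out : Int) : Prop := out = doit_heap_huffman_alt blocks split
instance (blocks : List Int) (split : Int) (out : Int) : Decidable (Spec_doit_heap_huffman blocks split out) := by unfold Spec_doit_heap_huffman; infer_instance

-- ===== CLAIM (what is proved, stated in full; the proofs are below) =====
def Claim_equal_doit_heap_huffman : Prop := ∀ (blocks : List Int) (split : Int), Dom_doit_heap_huffman blocks split → Pre_doit_heap_huffman blocks split → Spec_doit_heap_huffman blocks split (doit_heap_huffman blocks split)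

-- ===== LEMMAS AND PROOFS =====

theorem popMinA_perm (l : List Int) (h : l ≠ []) : ((popMinA l).1 :: (popMinA l).2).Perm l := by
  induction l with
  | nil => exact absurd rfl h
  | cons x xs ih =>
    simp only [popMinA]
    cases hxs : popMinA xs with
    | mk m r =>
      by_cases hc : x ≤ m ∨ xs = []
      · simp [hc]
      · have hne : xs ≠ [] := fun h0 => hc (Or.inr h0)
        have hp := ih hne
        rw [hxs] at hp
        simp only [if_neg hc]
        exact (List.Perm.swap x m r).trans (hp.cons x)

theorem popMinA_min (l : List Int) : ∀ y ∈ l, (popMinA l).1 ≤ y := by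
  induction l with
  | nil => intro y hy; simp at hy
  | cons x xs ih =>
    intro y hy
    simp only [popMinA]
    cases hxs : popMinA xs with
    | mk m r =>
      have ihm : ∀ y ∈ xs, m ≤ y := by
        intro z hz; have := ih z hz; rw [hxs] at this; exact this
      by_cases hc : x ≤ m ∨ xs = []
      · simp only [if_pos hc]
        rcases List.mem_cons.1 hy with h | h
        · omega
        · rcases hc with hc | hc
          · exact le_trans hc (ihm y h)
          · rw [hc] at h; simp at h
      · simp only [if_neg hc]
        have hmx : m ≤ x := le_of_not_ge fun h0 => hc (Or.inl h0)
        rcases List.mem_cons.1 hy with h | h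
        · omega
        · exact ihm y h

theorem popMinA_mem (l : List Int) (h : l ≠ []) : (popMinA l).1 ∈ l :=
  (popMinA_perm l h).mem_iff.1 (List.mem_cons_self ..)

theorem popMinA_val_eq (l l' : List Int) (h : l ≠ []) (hp : l.Perm l') :
    (popMinA l).1 = (popMinA l').1 := by
  have h' : l' ≠ [] := by intro h0; subst h0; exact h hp.eq_nil
  refine le_antisymm ?_ ?_
  · exact popMinA_min l _ (hp.mem_iff.2 (popMinA_mem l' h'))
  · exact popMinA_min l' _ (hp.mem_iff.1 (popMinA_mem l h))

theorem popMinA_rem_perm (l l' : List Int) (h : l ≠ []) (hp : l.Perm l') :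
    (popMinA l).2.Perm (popMinA l').2 := by
  have h' : l' ≠ [] := by intro h0; subst h0; exact h hp.eq_nil
  have p1 := popMinA_perm l h
  have p2 := popMinA_perm l' h'
  have hv := popMinA_val_eq l l' h hp
  have p2' := p2.symm
  rw [← hv] at p2'
  exact ((p1.trans hp).trans p2').cons_inv

theorem heapLoop_perm (split : Int) : ∀ (n : ℕ) (l l' : List Int), l.length = n →
    l.Perm l' → heapLoop split l = heapLoop split l' := by
  intro n
  induction n using Nat.strong_induction_on with
  | _ n ih =>
    intro l l' hn hp
    have hlen := hp.length_eq
    rw [heapLoop]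
    conv_rhs => rw [heapLoop]
    by_cases hb : 1 < l.length
    · have hb' : 1 < l'.length := by omega
      rw [dif_pos hb, dif_pos hb']
      have h1 : l ≠ [] := by intro h0; subst h0; simp at hb
      obtain ⟨a, r1, hpa⟩ : ∃ x r, popMinA l = (x, r) := ⟨_, _, rfl⟩
      obtain ⟨b, r2, hqa⟩ : ∃ x r, popMinA r1 = (x, r) := ⟨_, _, rfl⟩
      obtain ⟨a', s1, hpb⟩ : ∃ x r, popMinA l' = (x, r) := ⟨_, _, rfl⟩
      obtain ⟨b', s2, hqb⟩ : ∃ x r, popMinA s1 = (x, r) := ⟨_, _, rfl⟩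
      simp only [hpa, hqa, hpb, hqb]
      have e1 : r1.length + 1 = l.length := by
        have h := popMinA_length l h1; rw [hpa] at h; exact h
      have h2 : r1 ≠ [] := by intro h0; rw [h0] at e1; simp at e1; omega
      have rp1 : r1.Perm s1 := by
        have h := popMinA_rem_perm l l' h1 hp; rw [hpa, hpb] at h; exact h
      have hv1 : a = a' := by
        have h := popMinA_val_eq l l' h1 hp; rw [hpa, hpb] at h; exact h
      have hv2 : b = b' := by
        have h := popMinA_val_eq r1 s1 h2 rp1; rw [hqa, hqb] at h; exact h
      have rp2 : r2.Perm s2 := by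
        have h := popMinA_rem_perm r1 s1 h2 rp1; rw [hqa, hqb] at h; exact h
      have e2 : r2.length + 1 = r1.length := by
        have h := popMinA_length r1 h2; rw [hqa] at h; exact h
      refine ih (l.length - 1) (by omega) _ _ (by simp; omega) ?_
      rw [hv1, hv2]
      exact rp2.append_right _
    · have hb' : ¬ 1 < l'.length := by omega
      rw [dif_neg hb, dif_neg hb']
      match l, hp, hb with
      | [], hp, _ => rw [List.Perm.eq_nil hp.symm]
      | [x], hp, _ => rw [List.singleton_perm.1 hp]
      | x :: y :: t, _, hb => simp at hb

-- sortedness helpers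
theorem popMinB_split (o m : List Int) (h : ¬(o = [] ∧ m = [])) :
    (∃ t, o = (popMinB o m).1 :: t ∧ (popMinB o m).2.1 = t ∧ (popMinB o m).2.2 = m) ∨
    (∃ t, m = (popMinB o m).1 :: t ∧ (popMinB o m).2.1 = o ∧ (popMinB o m).2.2 = t) := by
  match o, m with
  | [], [] => exact absurd ⟨rfl, rfl⟩ h
  | [], m :: ms => right; exact ⟨ms, by simp [popMinB]⟩
  | o :: os, [] => left; exact ⟨os, by simp [popMinB]⟩
  | o :: os, m :: ms =>
    by_cases hc : o ≤ m
    · left; exact ⟨os, by simp [popMinB, hc]⟩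
    · right; exact ⟨ms, by simp [popMinB, hc]⟩

theorem popMinB_perm (o m : List Int) (h : ¬(o = [] ∧ m = [])) :
    ((popMinB o m).1 :: ((popMinB o m).2.1 ++ (popMinB o m).2.2)).Perm (o ++ m) := by
  rcases popMinB_split o m h with ⟨t, h1, h2, h3⟩ | ⟨t, h1, h2, h3⟩
  · rw [h2, h3]
    conv_rhs => rw [h1]
    exact List.Perm.refl _
  · rw [h2, h3]
    conv_rhs => rw [h1]
    exact List.perm_middle.symm

theorem popMinB_min (o m : List Int) (ho : o.Pairwise (· ≤ ·)) (hm : m.Pairwise (· ≤ ·)) :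
    ∀ y ∈ o ++ m, (popMinB o m).1 ≤ y := by
  match o, m with
  | [], [] => intro y hy; simp at hy
  | [], m :: ms =>
    intro y hy
    simp only [popMinB, List.nil_append] at *
    rcases List.mem_cons.1 hy with h | h
    · omega
    · exact (List.pairwise_cons.1 hm).1 y h
  | o :: os, [] =>
    intro y hy
    simp only [popMinB, List.append_nil] at *
    rcases List.mem_cons.1 hy with h | h
    · omega
    · exact (List.pairwise_cons.1 ho).1 y h
  | o :: os, m :: ms =>
    intro y hy
    have hos := (List.pairwise_cons.1 ho).1
    have hms := (List.pairwise_cons.1 hm).1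
    simp only [popMinB]
    by_cases hc : o ≤ m <;> simp only [hc, if_pos, ite_false]
    · rcases List.mem_append.1 hy with h | h
      · rcases List.mem_cons.1 h with h | h
        · omega
        · exact hos y h
      · rcases List.mem_cons.1 h with h | h
        · omega
        · exact le_trans hc (hms y h)
    · rcases List.mem_append.1 hy with h | h
      · rcases List.mem_cons.1 h with h | h
        · omega
        · have := hos y h; omega
      · rcases List.mem_cons.1 h with h | h
        · omega
        · exact hms y h

theorem popMinB_sorted (o m : List Int) (ho : o.Pairwise (· ≤ ·)) (hm : m.Pairwise (· ≤ ·)) :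
    (popMinB o m).2.1.Pairwise (· ≤ ·) ∧ (popMinB o m).2.2.Pairwise (· ≤ ·) := by
  by_cases h : o = [] ∧ m = []
  · obtain ⟨h1, h2⟩ := h; subst h1; subst h2; simp [popMinB]
  rcases popMinB_split o m h with ⟨t, h1, h2, h3⟩ | ⟨t, h1, h2, h3⟩
  · rw [h2, h3]
    exact ⟨(List.pairwise_cons.1 (h1 ▸ ho)).2, hm⟩
  · rw [h2, h3]
    exact ⟨ho, (List.pairwise_cons.1 (h1 ▸ hm)).2⟩

theorem mem_dropLast_cons (b : Int) (t : List Int) (x : Int) (hx : x ∈ t) :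
    b ∈ (b :: t).dropLast := by
  cases t with
  | nil => simp at hx
  | cons c t' => rw [List.dropLast_cons₂]; exact List.mem_cons_self ..

theorem sorted_le_getLast : ∀ (l : List Int), l.Pairwise (· ≤ ·) →
    ∀ x ∈ l, ∀ L, l.getLast? = some L → x ≤ L := by
  intro l
  induction l with
  | nil => intro _ x hx; simp at hx
  | cons a t ih =>
    intro hp x hx L hL
    cases t with
    | nil =>
      simp at hx hL
      omega
    | cons b t' =>
      rw [List.getLast?_cons_cons] at hL
      have hLmem : L ∈ b :: t' := List.mem_of_getLast? hL
      rcases List.mem_cons.1 hx with h | h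
      · subst h
        exact (List.pairwise_cons.1 hp).1 L hLmem
      · exact ih (List.pairwise_cons.1 hp).2 x h L hL

-- the key invariant: originals and merged queue sorted, and every element x other than the
-- merged queue's last L satisfies L ≤ x + split; then the two-queue loop equals the heap loop.
theorem twoLoop_eq_heapLoop (split : Int) : ∀ (n : ℕ) (orig merged : List Int),
    orig.length + merged.length = n →
    orig.Pairwise (· ≤ ·) → merged.Pairwise (· ≤ ·) →
    (∀ L, merged.getLast? = some L → ∀ x ∈ orig ++ merged.dropLast, L ≤ x + split) →
    twoLoop split orig merged = heapLoop split (orig ++ merged) := by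
  intro n
  induction n using Nat.strong_induction_on with
  | _ n ih =>
  intro orig merged hn ho hm hinv
  rw [twoLoop, heapLoop]
  by_cases hb : 1 < orig.length + merged.length
  case neg =>
    rw [dif_neg hb, dif_neg (by simpa using hb)]
    cases orig with
    | nil => simp
    | cons o os => simp
  case pos =>
  rw [dif_pos hb, dif_pos (by simpa using hb)]
  have hne : ¬(orig = [] ∧ merged = []) := by
    rintro ⟨h1, h2⟩; subst h1; subst h2; simp at hb
  have hSne : orig ++ merged ≠ [] := by
    intro h0
    rcases List.append_eq_nil_iff.1 h0 with ⟨h1, h2⟩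
    exact hne ⟨h1, h2⟩
  obtain ⟨a, o1, m1, hpB⟩ : ∃ a o1 m1, popMinB orig merged = (a, o1, m1) := ⟨_, _, _, rfl⟩
  obtain ⟨b, o2, m2, hqB⟩ : ∃ b o2 m2, popMinB o1 m1 = (b, o2, m2) := ⟨_, _, _, rfl⟩
  obtain ⟨a', r1, hpA⟩ : ∃ x r, popMinA (orig ++ merged) = (x, r) := ⟨_, _, rfl⟩
  obtain ⟨b', r2, hqA⟩ : ∃ x r, popMinA r1 = (x, r) := ⟨_, _, rfl⟩
  simp only [hpB, hqB, hpA, hqA]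
  -- instantiated facts about the pops
  have permB1 : (a :: (o1 ++ m1)).Perm (orig ++ merged) := by
    have h := popMinB_perm orig merged hne; rw [hpB] at h; exact h
  have minB1 : ∀ y ∈ orig ++ merged, a ≤ y := by
    have h := popMinB_min orig merged ho hm; rw [hpB] at h; exact h
  have hso1 : o1.Pairwise (· ≤ ·) := by
    have h := (popMinB_sorted orig merged ho hm).1; rw [hpB] at h; exact h
  have hsm1 : m1.Pairwise (· ≤ ·) := by
    have h := (popMinB_sorted orig merged ho hm).2; rw [hpB] at h; exact h
  have lenB1 : o1.length + m1.length + 1 = orig.length + merged.length := by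
    have h := popMinB_length orig merged hne; rw [hpB] at h; exact h
  have permA1 : (a' :: r1).Perm (orig ++ merged) := by
    have h := popMinA_perm (orig ++ merged) hSne; rw [hpA] at h; exact h
  have lenA1 : r1.length + 1 = (orig ++ merged).length := by
    have h := popMinA_length (orig ++ merged) hSne; rw [hpA] at h; exact h
  have hv1 : a' = a := by
    refine le_antisymm ?_ ?_
    · have h := popMinA_min (orig ++ merged) a (permB1.mem_iff.1 (List.mem_cons_self ..))
      rw [hpA] at h; exact h
    · have h := popMinA_mem (orig ++ merged) hSne
      rw [hpA] at h; exact minB1 _ h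
  rw [hv1] at permA1 ⊢
  have perm1 : r1.Perm (o1 ++ m1) := (permA1.trans permB1.symm).cons_inv
  have hne2 : ¬(o1 = [] ∧ m1 = []) := by
    rintro ⟨h1, h2⟩; rw [h1, h2] at lenB1; simp at lenB1; omega
  have hr1ne : r1 ≠ [] := by
    intro h0; rw [h0] at lenA1; simp [List.length_append] at lenA1; omega
  have permB2 : (b :: (o2 ++ m2)).Perm (o1 ++ m1) := by
    have h := popMinB_perm o1 m1 hne2; rw [hqB] at h; exact h
  have minB2 : ∀ y ∈ o1 ++ m1, b ≤ y := by
    have h := popMinB_min o1 m1 hso1 hsm1; rw [hqB] at h; exact h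
  have hso2 : o2.Pairwise (· ≤ ·) := by
    have h := (popMinB_sorted o1 m1 hso1 hsm1).1; rw [hqB] at h; exact h
  have hsm2 : m2.Pairwise (· ≤ ·) := by
    have h := (popMinB_sorted o1 m1 hso1 hsm1).2; rw [hqB] at h; exact h
  have lenB2 : o2.length + m2.length + 1 = o1.length + m1.length := by
    have h := popMinB_length o1 m1 hne2; rw [hqB] at h; exact h
  have hbmem1 : b ∈ o1 ++ m1 := permB2.mem_iff.1 (List.mem_cons_self ..)
  have hv2 : b' = b := by
    refine le_antisymm ?_ ?_
    · have h := popMinA_min r1 b (perm1.mem_iff.2 hbmem1)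
      rw [hqA] at h; exact h
    · have h := popMinA_mem r1 hr1ne
      rw [hqA] at h; exact minB2 _ (perm1.mem_iff.1 h)
  have permA2 : (b' :: r2).Perm r1 := by
    have h := popMinA_perm r1 hr1ne; rw [hqA] at h; exact h
  rw [hv2] at permA2 ⊢
  have perm2 : r2.Perm (o2 ++ m2) := ((permA2.trans perm1).trans permB2.symm).cons_inv
  have hab : a ≤ b := minB1 b (permB1.mem_iff.1 (List.mem_cons.2 (Or.inr hbmem1)))
  have hrem_ge : ∀ x ∈ o2 ++ m2, b ≤ x := fun x hx =>
    minB2 x (permB2.mem_iff.1 (List.mem_cons.2 (Or.inr hx)))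
  have hrem_ge1 : ∀ x ∈ o2 ++ m2, a ≤ x := fun x hx =>
    minB1 x (permB1.mem_iff.1 (List.mem_cons.2 (Or.inr
      (permB2.mem_iff.1 (List.mem_cons.2 (Or.inr hx))))))
  -- the hard fact: elements left in the merged queue are ≤ the newly merged value
  have hx_le_new : ∀ x ∈ m2, x ≤ max a b + split := by
    intro x hx
    rw [max_eq_right hab]
    have key : x ∈ merged ∧ b ∈ orig ++ merged.dropLast := by
      rcases popMinB_split orig merged hne with ⟨t1, e1, e2, e3⟩ | ⟨t1, e1, e2, e3⟩ <;>
        simp only [hpB] at e1 e2 e3 <;>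
        rcases popMinB_split o1 m1 hne2 with ⟨t2, f1, f2, f3⟩ | ⟨t2, f1, f2, f3⟩ <;>
        simp only [hqB] at f1 f2 f3
      · -- orig = a :: t1 (o1 = t1, m1 = merged); o1 = b :: t2 (o2 = t2, m2 = m1)
        constructor
        · rw [f3, e3] at hx; exact hx
        · apply List.mem_append.2; left
          have horig : orig = a :: b :: t2 := by rw [e1, ← e2, f1]
          rw [horig]
          exact List.mem_cons_of_mem _ (List.mem_cons_self ..)
      · -- orig = a :: t1 (m1 = merged); m1 = b :: t2 (m2 = t2)
        have hme : merged = b :: t2 := by rw [← e3, f1]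
        constructor
        · rw [hme]; exact List.mem_cons_of_mem _ (f3 ▸ hx)
        · apply List.mem_append.2; right
          rw [hme]
          exact mem_dropLast_cons b t2 x (f3 ▸ hx)
      · -- merged = a :: t1 (o1 = orig, m1 = t1); o1 = b :: t2 (m2 = m1)
        constructor
        · rw [e1]
          exact List.mem_cons_of_mem _ (e3 ▸ f3 ▸ hx)
        · apply List.mem_append.2; left
          have horig : orig = b :: t2 := by rw [← e2, f1]
          rw [horig]
          exact List.mem_cons_self ..
      · -- merged = a :: t1 (m1 = t1); m1 = b :: t2 (m2 = t2)
        have hme : merged = a :: b :: t2 := by rw [e1, ← e3, f1]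
        constructor
        · rw [hme]
          exact List.mem_cons_of_mem _ (List.mem_cons_of_mem _ (f3 ▸ hx))
        · apply List.mem_append.2; right
          rw [hme, List.dropLast_cons₂]
          exact List.mem_cons_of_mem _ (mem_dropLast_cons b t2 x (f3 ▸ hx))
    obtain ⟨hxm, hbo⟩ := key
    have hmne : merged ≠ [] := by intro h0; rw [h0] at hxm; simp at hxm
    obtain ⟨L, hL⟩ : ∃ L, merged.getLast? = some L := by
      cases hml : merged.getLast? with
      | none => exact absurd (List.getLast?_eq_none_iff.1 hml) hmne
      | some L => exact ⟨L, rfl⟩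
    have hxL : x ≤ L := sorted_le_getLast merged hm x hxm L hL
    have hLb := hinv L hL _ hbo
    omega
  -- assemble: one step of both loops, then the induction hypothesis
  rw [ih (n - 1) (by omega) o2 (m2 ++ [max a b + split])
      (by simp only [List.length_append, List.length_cons, List.length_nil]; omega)
      hso2
      (by
        rw [List.pairwise_append]
        refine ⟨hsm2, by simp, ?_⟩
        intro x hx y hy
        rw [List.mem_singleton] at hy
        subst hy
        exact hx_le_new x hx)
      (by
        intro L hL x hx
        rw [List.getLast?_concat] at hL
        rw [List.dropLast_concat] at hx
        cases hL
        have h2 := max_le (hrem_ge1 x hx) (hrem_ge x hx)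
        omega)]
  refine heapLoop_perm split (o2 ++ (m2 ++ [max a b + split])).length _ _ rfl ?_
  rw [← List.append_assoc]
  exact perm2.symm.append_right _

-- ===== VERDICT (by name: the statement is the Claim_ definition above) =====
theorem doit_heap_huffman_spec : Claim_equal_doit_heap_huffman := by
  intro blocks split _ _
  unfold Spec_doit_heap_huffman doit_heap_huffman doit_heap_huffman_alt
  rw [twoLoop_eq_heapLoop split (PySem.List.sorted blocks (fun x => x) false).length _ [] (by simp)
      (PySem.List.sorted_pairwise blocks (fun x => x)) (by simp) (by simp)]
  simp only [List.append_nil]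
  exact heapLoop_perm split blocks.length blocks _ rfl
    (PySem.List.sorted_perm blocks (fun x => x) false).symm
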